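-- pv_equiv track=rewrite | github.com/flongy72/Advent_of_Code | 2016/Day_16/advent_2016_day16.py | create_checksum
-- ===== SOURCE A (Python) =====
-- def create_checksum(str, disk):
--     new_string = ""
--     if len(str) > disk:
--         useful_data = str[:disk]
--     else:
--         useful_data = str
--     for i in range(0, len(useful_data),2):
--         if useful_data[i] == useful_data[i+1]:
--             new_string += "1"
--         else:
--             new_string += "0"
--     if len(new_string) % 2 == 0:
--         return create_checksum(new_string, disk)
--     else:
--         return new_string
-- ===== SOURCE B (Python) =====
-- def create_checksum(str, disk):
--     data = str[:disk] if len(str) > disk else str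
--     bits = [data[i] == data[i + 1] for i in range(0, len(data), 2)]
--     n = len(bits)
--     d = 0
--     while n % 2 == 0:
--         n //= 2
--         d += 1
--     if d == 0:
--         return "".join("1" if b else "0" for b in bits)
--     block = 1 << d
--     out = []
--     for j in range(n):
--         parity = False
--         for b in bits[j * block:(j + 1) * block]:
--             parity ^= b
--         out.append("0" if parity else "1")
--     return "".join(out)
-- ===== Notes on version B (the rewrite author's own statement) =====
-- stated objective: alternative
-- what changed: B replaces A's repeated halving recursion by a closed form: it computes the first-level pair bits once, finds the 2-adic valuation d of the bit count, and emits each output character directly as the complemented XOR-parity of one 2^d-sized block of bits.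
-- outside the precondition, e.g. on create_checksum('aaaaaaaaaaaaaaaa', -4): A returns '1', B returns '111'; on create_checksum('aaaaaaaaaa', -2): A returns '1', B returns '1'
import Mathlib
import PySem

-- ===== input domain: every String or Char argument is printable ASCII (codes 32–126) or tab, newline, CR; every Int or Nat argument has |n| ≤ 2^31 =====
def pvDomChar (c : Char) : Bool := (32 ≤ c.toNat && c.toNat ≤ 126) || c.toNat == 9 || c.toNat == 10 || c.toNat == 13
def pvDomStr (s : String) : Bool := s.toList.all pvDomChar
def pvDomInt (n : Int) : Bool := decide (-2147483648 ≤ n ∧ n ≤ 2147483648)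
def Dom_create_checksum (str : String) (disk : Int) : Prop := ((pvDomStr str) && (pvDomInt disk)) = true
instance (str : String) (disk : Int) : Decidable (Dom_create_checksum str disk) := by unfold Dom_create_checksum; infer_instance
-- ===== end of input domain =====

-- B replaces A's halving recursion by a closed form: pair bits once, then each output char is the
-- complemented XOR-parity of a 2^d block (d = 2-adic valuation of the bit count); same cost.

-- ===== PORT A =====
-- the 'for i in range(0, len(useful_data), 2)' accumulation loop of A (string += ; none = IndexError)
def pvReduceA (l : List Char) : Option (List Char) :=
  (PySem.List.pyRange 0 (l.length : Int) 2).foldl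
    (fun acc i =>
      match acc with
      | none => none
      | some ns =>
        match PySem.List.pyGet? l i, PySem.List.pyGet? l (i + 1) with
        | some c1, some c2 => some (ns ++ [if c1 == c2 then '1' else '0'])
        | _, _ => none)
    (some [])

-- A's recursion, fuel-bounded: fuel 0 / the 'none' branch are where Python A diverges resp. raises (both outside Pre_)
def pvAuxA : Nat → List Char → Int → String
  | 0, _, _ => ""
  | Nat.succ fuel, l, disk =>
    let useful := if (l.length : Int) > disk then PySem.List.slice l none (some disk) else l
    match pvReduceA useful with
    | none => ""
    | some ns => if ns.length % 2 == 0 then pvAuxA fuel ns disk else String.ofList ns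

def create_checksum (str : String) (disk : Int) : String :=
  pvAuxA (str.toList.length + 1) str.toList disk

-- ===== PORT B =====
-- the list comprehension '[data[i] == data[i+1] for i in range(0, len(data), 2)]' (none = IndexError)
def pvBits (l : List Char) : Option (List Bool) :=
  (PySem.List.pyRange 0 (l.length : Int) 2).mapM
    (fun i =>
      match PySem.List.pyGet? l i, PySem.List.pyGet? l (i + 1) with
      | some c1, some c2 => some (c1 == c2)
      | _, _ => none)

-- the 'while n % 2 == 0: n //= 2; d += 1' loop, fuel-bounded (fuel 0 = Python diverging, outside Pre_)
def pvV2 : Nat → Nat → Nat × Nat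
  | 0, n => (n, 0)
  | Nat.succ fuel, n =>
    if n % 2 == 0 then
      let p := pvV2 fuel (n / 2)
      (p.1, p.2 + 1)
    else (n, 0)

def create_checksum_alt (str : String) (disk : Int) : String :=
  let data := if (str.toList.length : Int) > disk then PySem.List.slice str.toList none (some disk) else str.toList
  match pvBits data with
  | none => ""
  | some bits =>
    let nd := pvV2 (bits.length + 1) bits.length
    if nd.2 == 0 then String.ofList (bits.map (fun b => if b then '1' else '0'))
    else
      let block : Int := 2 ^ nd.2
      let out := (PySem.List.pyRange 0 (nd.1 : Int) 1).foldl
        (fun acc j =>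
          let parity := (PySem.List.slice bits (some (j * block)) (some ((j + 1) * block))).foldl
            (fun p b => xor p b) false
          acc ++ [if parity then '0' else '1']) ([] : List Char)
      String.ofList out

-- ===== PRECONDITION & SPEC =====
-- Pre_ restricts to the natural domain disk ≥ 1 (a positive disk size); for disk < 0 — where A's per-call
-- negative-slice re-truncation is accidental — it keeps only the single-reduction inputs, on which that
-- re-truncation never fires; it also excludes the inputs where A raises: odd truncated length (IndexError)
-- and an empty truncation (unbounded recursion, RecursionError).
def Pre_create_checksum (str : String) (disk : Int) : Prop :=
  (1 ≤ disk ∧ str.toList ≠ [] ∧ (min str.toList.length disk.toNat) % 2 = 0) ∨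
  (disk < 0 ∧ (str.toList.length - (-disk).toNat) % 2 = 0 ∧ 0 < str.toList.length - (-disk).toNat ∧
    ((str.toList.length - (-disk).toNat) / 2) % 2 = 1)
instance (str : String) (disk : Int) : Decidable (Pre_create_checksum str disk) := by
  unfold Pre_create_checksum; infer_instance

def pvWitness_create_checksum : String × Int := ("1101", 4)

def Spec_create_checksum (str : String) (disk : Int) (out : String) : Prop := out = create_checksum_alt str disk
instance (str : String) (disk : Int) (out : String) : Decidable (Spec_create_checksum str disk out) := by
  unfold Spec_create_checksum; infer_instance

-- ===== CLAIM (what is proved, stated in full; the proofs are below) =====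
def Claim_equal_create_checksum : Prop := ∀ (str : String) (disk : Int), Dom_create_checksum str disk → Pre_create_checksum str disk → Spec_create_checksum str disk (create_checksum str disk)

-- ===== LEMMAS AND PROOFS =====

-- '1'/'0' rendering of a bit
def pvRep (b : Bool) : Char := if b then '1' else '0'

-- the pairwise f-combination of an even-length list, as a plain structural function (proof-side)
def pvPairsF {β : Type} (f : Char → Char → β) : List Char → List β
  | a :: b :: t => f a b :: pvPairsF f t
  | _ => []

-- one XNOR-reduction level on bits
def pvRed : List Bool → List Bool
  | a :: b :: t => (a == b) :: pvRed t
  | _ => []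

def pvXor (bs : List Bool) : Bool := bs.foldl xor false

theorem pv_red_length : ∀ bs : List Bool, (pvRed bs).length = bs.length / 2
  | [] => rfl
  | [_] => by simp [pvRed]
  | _ :: _ :: t => by simp [pvRed, pv_red_length t]; omega

-- A's result as a function of the first-level bits: reduce while the length is even
def pvFinal (bs : List Bool) : List Bool :=
  if h : bs.length % 2 = 0 ∧ bs ≠ [] then pvFinal (pvRed bs) else bs
termination_by bs.length
decreasing_by
  rw [pv_red_length]
  have : 0 < bs.length := List.length_pos_iff.mpr h.2
  omega

-- B's closed form: one block of size 2^d per output bit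
def pvBlk (d : Nat) (bs : List Bool) : List Bool :=
  if bs = [] then [] else (!pvXor (bs.take (2 ^ d))) :: pvBlk d (bs.drop (2 ^ d))
termination_by bs.length
decreasing_by
  have h1 : 0 < bs.length := List.length_pos_iff.mpr (by assumption)
  have h2 : 0 < 2 ^ d := Nat.pow_pos (n := d) (by norm_num)
  simp only [List.length_drop]
  omega

theorem pv_witness_ok : Dom_create_checksum pvWitness_create_checksum.1 pvWitness_create_checksum.2 ∧
    Pre_create_checksum pvWitness_create_checksum.1 pvWitness_create_checksum.2 := by decide

theorem pv_foldl_none {β : Type} (f : Int → Option β) (R : List Int) :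
    R.foldl (fun acc? i => acc?.bind (fun ns => (f i).map (fun c => ns ++ [c]))) none = none := by
  induction R with
  | nil => rfl
  | cons i R ih => simpa using ih

-- A's '+=' fold equals a mapM-join, generically over the index list
theorem pv_foldl_eq_mapM {β : Type} (f : Int → Option β) :
    ∀ (R : List Int) (acc : List β),
      R.foldl (fun acc? i => acc?.bind (fun ns => (f i).map (fun c => ns ++ [c]))) (some acc)
        = (R.mapM f).map (fun cs => acc ++ cs) := by
  intro R
  induction R with
  | nil => intro acc; simp
  | cons i R ih =>
    intro acc
    rw [List.foldl_cons]
    rw [show ((some acc).bind fun ns => Option.map (fun c => ns ++ [c]) (f i))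
        = (f i).map (fun c => acc ++ [c]) from rfl]
    cases hf : f i with
    | none =>
      simp only [Option.map_none]
      rw [List.mapM_cons, hf]
      simp [pv_foldl_none]
    | some c =>
      simp only [Option.map_some]
      rw [ih (acc ++ [c]), List.mapM_cons, hf]
      cases hR : R.mapM f <;> simp

theorem pv_pyRange_two_step (n : Nat) :
    PySem.List.pyRange 0 ((n : Int) + 2) 2 = 0 :: (PySem.List.pyRange 0 (n : Int) 2).map (· + 2) := by
  rw [PySem.List.pyRange_of_pos _ _ (by norm_num), PySem.List.pyRange_of_pos _ _ (by norm_num)]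
  have h2 : (0:Int) < (n:Int) + 2 := by positivity
  simp only [if_pos h2]
  have hcount : (((n:Int) + 2 - 0 + 2 - 1) / 2).toNat
      = (if (0:Int) < (n:Int) then (((n:Int) - 0 + 2 - 1) / 2).toNat else 0) + 1 := by
    by_cases hn : (0:Int) < (n:Int)
    · rw [if_pos hn]; omega
    · rw [if_neg hn]; omega
  rw [hcount, List.range_succ_eq_map]
  simp only [List.map_cons, List.map_map]
  rfl

theorem pv_mapM_congr_mem {α β : Type} {f g : α → Option β} :
    ∀ (R : List α), (∀ x ∈ R, f x = g x) → R.mapM f = R.mapM g := by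
  intro R
  induction R with
  | nil => intro _; rfl
  | cons x R ih =>
    intro h
    simp only [List.mapM_cons, h x (List.mem_cons_self), ih (fun y hy => h y (List.mem_cons_of_mem _ hy))]

-- the pairwise mapM over range(0, len, 2) computes pvPairsF, for even length
theorem pv_mapM_pairs {β : Type} (f : Char → Char → β) :
    ∀ n (l : List Char), l.length = n → l.length % 2 = 0 →
      (PySem.List.pyRange 0 (l.length : Int) 2).mapM
        (fun i =>
          match PySem.List.pyGet? l i, PySem.List.pyGet? l (i + 1) with
          | some c1, some c2 => some (f c1 c2)
          | _, _ => none) = some (pvPairsF f l) := by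
  intro n
  induction n using Nat.strong_induction_on with
  | _ n ih =>
    intro l hn hlen
    match l with
    | [] => rfl
    | [a] => simp at hlen
    | a :: b :: t =>
      have ht : t.length % 2 = 0 := by simp at hlen; omega
      have iht := ih t.length (by simp at hn; omega) t rfl ht
      have hL : ((a :: b :: t).length : Int) = (t.length : Int) + 2 := by simp; omega
      rw [hL, pv_pyRange_two_step]
      simp only [List.mapM_cons]
      have h0 : PySem.List.pyGet? (a :: b :: t) 0 = some a := PySem.List.pyGet?_zero_cons a (b :: t)
      have h1 : PySem.List.pyGet? (a :: b :: t) (0 + 1) = some b := by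
        rw [PySem.List.pyGet?_of_nonneg _ (by norm_num)]
        rfl
      rw [h0, h1]
      have hshift : List.mapM
          (fun i => match PySem.List.pyGet? (a :: b :: t) i, PySem.List.pyGet? (a :: b :: t) (i + 1) with
            | some c1, some c2 => some (f c1 c2)
            | _, _ => none)
          ((PySem.List.pyRange 0 ((t.length:Nat) : Int) 2).map (· + 2))
          = List.mapM
          (fun i => match PySem.List.pyGet? t i, PySem.List.pyGet? t (i + 1) with
            | some c1, some c2 => some (f c1 c2)
            | _, _ => none)
          (PySem.List.pyRange 0 ((t.length:Nat) : Int) 2) := by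
        rw [List.mapM_map]
        apply pv_mapM_congr_mem
        intro i hi
        have hnn : 0 ≤ i := ((PySem.List.mem_pyRange_iff_of_pos (by norm_num) i).1 hi).1
        have g1 : PySem.List.pyGet? (a :: b :: t) (i + 2) = PySem.List.pyGet? t i := by
          rw [PySem.List.pyGet?_of_nonneg _ (by omega), PySem.List.pyGet?_of_nonneg _ hnn]
          have h2 : (i + 2).toNat = i.toNat + 2 := by omega
          rw [h2]
          simp
        have g2 : PySem.List.pyGet? (a :: b :: t) (i + 2 + 1) = PySem.List.pyGet? t (i + 1) := by
          rw [PySem.List.pyGet?_of_nonneg _ (by omega), PySem.List.pyGet?_of_nonneg _ (by omega)]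
          have h2 : (i + 2 + 1).toNat = (i + 1).toNat + 2 := by omega
          rw [h2]
          simp
        simp only [Function.comp_apply]
        simp only [g1, g2]
      rw [hshift, iht]
      simp [pvPairsF]

theorem pv_pairsF_comp {β γ : Type} (f : Char → Char → β) (g : β → γ) :
    ∀ l : List Char, pvPairsF (fun a b => g (f a b)) l = (pvPairsF f l).map g
  | [] => rfl
  | [_] => rfl
  | a :: b :: t => by simp [pvPairsF, pv_pairsF_comp f g t]

theorem pv_pairsF_length {β : Type} (f : Char → Char → β) :
    ∀ l : List Char, (pvPairsF f l).length = l.length / 2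
  | [] => rfl
  | [_] => by simp [pvPairsF]
  | _ :: _ :: t => by simp [pvPairsF, pv_pairsF_length f t]; omega

-- A's foldl on an even-length list yields the Rep'd bits
theorem pv_reduceA_even (l : List Char) (hlen : l.length % 2 = 0) :
    pvReduceA l = some ((pvPairsF (fun a b => a == b) l).map pvRep) := by
  unfold pvReduceA
  have hstep : (fun (acc : Option (List Char)) (i : Int) =>
      match acc with
      | none => none
      | some ns =>
        match PySem.List.pyGet? l i, PySem.List.pyGet? l (i + 1) with
        | some c1, some c2 => some (ns ++ [if c1 == c2 then '1' else '0'])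
        | _, _ => none)
      = (fun (acc? : Option (List Char)) (i : Int) =>
          acc?.bind (fun ns =>
            ((match PySem.List.pyGet? l i, PySem.List.pyGet? l (i + 1) with
               | some c1, some c2 => some (if c1 == c2 then '1' else '0')
               | _, _ => none) : Option Char).map (fun c => ns ++ [c]))) := by
    funext acc i
    cases acc with
    | none => rfl
    | some ns =>
      cases PySem.List.pyGet? l i with
      | none => rfl
      | some c1 => cases PySem.List.pyGet? l (i + 1) with
        | none => rfl
        | some c2 => rfl
  rw [hstep, pv_foldl_eq_mapM (fun i =>
      match PySem.List.pyGet? l i, PySem.List.pyGet? l (i + 1) with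
      | some c1, some c2 => some (if c1 == c2 then '1' else '0')
      | _, _ => none) (PySem.List.pyRange 0 (l.length : Int) 2) [],
    pv_mapM_pairs (fun a b => if a == b then '1' else '0') l.length l rfl hlen]
  simp only [Option.map_some, List.nil_append]
  have h := pv_pairsF_comp (fun a b => a == b) pvRep l
  simp only [pvRep] at h
  rw [h]

theorem pv_bits_even (l : List Char) (hlen : l.length % 2 = 0) :
    pvBits l = some (pvPairsF (fun a b => a == b) l) :=
  pv_mapM_pairs (fun a b => a == b) l.length l rfl hlen

-- reducing the Rep'd bits is pvRed
theorem pv_pairs_map_rep : ∀ bs : List Bool,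
    pvPairsF (fun a b => a == b) (bs.map pvRep) = pvRed bs
  | [] => rfl
  | [a] => by cases a <;> rfl
  | a :: b :: t => by
    cases a <;> cases b <;>
      simp [pvPairsF, pvRed, pvRep, pv_pairs_map_rep t]

theorem pv_red_ne_nil (bs : List Bool) (h : 2 ≤ bs.length) : pvRed bs ≠ [] := by
  have := pv_red_length bs
  intro hc
  rw [hc] at this
  simp at this
  omega

-- A's recursion from level one onwards computes pvFinal of the reduced bits
theorem pv_auxA_rep : ∀ m : Nat, ∀ (bs : List Bool) (fa : Nat) (disk : Int),
    bs.length = m → m % 2 = 0 → 0 < m → (m : Int) ≤ disk → m ≤ fa →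
    pvAuxA fa (bs.map pvRep) disk = String.ofList ((pvFinal (pvRed bs)).map pvRep) := by
  intro m
  induction m using Nat.strong_induction_on with
  | _ m ih =>
    intro bs fa disk hl hev hpos hdisk hfa
    obtain ⟨fa', rfl⟩ : ∃ fa', fa = fa' + 1 := ⟨fa - 1, by omega⟩
    have hm2 : 2 ≤ m := by omega
    have hlen : (bs.map pvRep).length = m := by simp [hl]
    have hngt : ¬ (((bs.map pvRep).length : Int) > disk) := by rw [hlen]; omega
    unfold pvAuxA
    rw [if_neg hngt]
    show (match pvReduceA (bs.map pvRep) with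
          | none => ""
          | some ns => if (ns.length % 2 == 0) = true then pvAuxA fa' ns disk else String.ofList ns)
        = String.ofList ((pvFinal (pvRed bs)).map pvRep)
    rw [pv_reduceA_even _ (by rw [hlen]; exact hev), pv_pairs_map_rep]
    have hrl : (pvRed bs).length = m / 2 := by rw [pv_red_length, hl]
    have hrlen : ((pvRed bs).map pvRep).length = m / 2 := by simp [hrl]
    by_cases hhalf : (m / 2) % 2 = 0
    · have hA : (((pvRed bs).map pvRep).length % 2 == 0) = true := by rw [hrlen]; simpa using hhalf
      simp only [hA, if_true]
      have hred2 : pvRed bs ≠ [] := pv_red_ne_nil bs (by omega)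
      rw [ih (m / 2) (by omega) (pvRed bs) fa' disk hrl hhalf (by omega) (by omega) (by omega)]
      conv_rhs => rw [pvFinal]
      rw [dif_pos ⟨by rw [hrl]; exact hhalf, hred2⟩]
    · have hA : (((pvRed bs).map pvRep).length % 2 == 0) = false := by rw [hrlen]; simp; omega
      simp only [hA, Bool.false_eq_true, if_false]
      conv_rhs => rw [pvFinal]
      rw [dif_neg (by rw [hrl]; intro hc; exact hhalf hc.1)]

-- xor-fold accumulator lemma
theorem pv_xor_foldl : ∀ (t : List Bool) (x : Bool), t.foldl xor x = xor x (t.foldl xor false) := by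
  intro t
  induction t with
  | nil => intro x; simp
  | cons a t ih =>
    intro x
    simp only [List.foldl_cons]
    rw [ih (xor x a), ih (xor false a)]
    cases x <;> cases a <;> simp

theorem pv_xor_cons (a : Bool) (t : List Bool) : pvXor (a :: t) = xor a (pvXor t) := by
  unfold pvXor
  simp only [List.foldl_cons]
  rw [pv_xor_foldl]
  simp

-- parity of one reduction level
theorem pv_xor_red : ∀ cs : List Bool, cs.length % 2 = 0 →
    pvXor (pvRed cs) = xor (decide ((cs.length / 2) % 2 = 1)) (pvXor cs)
  | [], _ => by simp [pvRed, pvXor]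
  | [_], h => by simp at h
  | a :: b :: t, h => by
    have ht : t.length % 2 = 0 := by simp at h; omega
    have hlen : (a :: b :: t).length / 2 = t.length / 2 + 1 := by simp; omega
    rw [show pvRed (a :: b :: t) = (a == b) :: pvRed t from rfl,
      pv_xor_cons, pv_xor_red t ht, pv_xor_cons, pv_xor_cons, hlen]
    have hpar : (decide ((t.length / 2 + 1) % 2 = 1)) = !(decide ((t.length / 2) % 2 = 1)) := by
      rcases Nat.mod_two_eq_zero_or_one (t.length / 2) with hp | hp <;>
        simp [Nat.add_mod, hp]
    rw [hpar]
    cases a <;> cases b <;> cases hx : decide ((t.length / 2) % 2 = 1) <;>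
      cases hy : pvXor t <;> simp

theorem pv_red_take : ∀ (bs : List Bool) (k : Nat), (pvRed bs).take k = pvRed (bs.take (2 * k))
  | _, 0 => by simp [pvRed]
  | [], k + 1 => by simp [pvRed]
  | [a], k + 1 => by
    simp [pvRed, List.take]
  | a :: b :: t, k + 1 => by
    have h2 : 2 * (k + 1) = 2 * k + 1 + 1 := by ring
    rw [h2]
    show (a == b) :: (pvRed t).take k = pvRed (a :: b :: t.take (2 * k))
    rw [pv_red_take t k]
    rfl

theorem pv_red_drop : ∀ (bs : List Bool) (k : Nat), (pvRed bs).drop k = pvRed (bs.drop (2 * k))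
  | _, 0 => by simp
  | [], k + 1 => by simp [pvRed]
  | [a], k + 1 => by
    have : 2 * (k + 1) = 2 * k + 1 + 1 := by ring
    simp [this, pvRed]
  | a :: b :: t, k + 1 => by
    have h2 : 2 * (k + 1) = 2 * k + 1 + 1 := by ring
    rw [h2]
    show (pvRed t).drop k = pvRed (t.drop (2 * k))
    exact pv_red_drop t k

-- one blocking level absorbs one reduction level (block sizes 2^(d+1) vs 2^d, d ≥ 1)
theorem pv_blk_step (d : Nat) (hd : 1 ≤ d) :
    ∀ n (bs : List Bool), bs.length = n → 2 ^ (d + 1) ∣ bs.length →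
      pvBlk (d + 1) bs = pvBlk d (pvRed bs) := by
  intro n
  induction n using Nat.strong_induction_on with
  | _ n ih =>
    intro bs hn hdvd
    by_cases hnil : bs = []
    · subst hnil; simp [pvBlk, pvRed]
    · have hpos : 0 < bs.length := List.length_pos_iff.mpr hnil
      have hge : 2 ^ (d + 1) ≤ bs.length := Nat.le_of_dvd hpos hdvd
      have hpow : 0 < 2 ^ (d + 1) := Nat.pow_pos (by norm_num)
      have hev : bs.length % 2 = 0 := by
        have h2 : 2 ∣ bs.length := (dvd_pow_self 2 (Nat.succ_ne_zero d)).trans hdvd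
        omega
      have hredne : pvRed bs ≠ [] := pv_red_ne_nil bs (by
        have : 2 ≤ 2 ^ (d + 1) := by
          calc 2 = 2 ^ 1 := by norm_num
          _ ≤ 2 ^ (d + 1) := Nat.pow_le_pow_right (by norm_num) (by omega)
        omega)
      conv_lhs => rw [pvBlk]
      conv_rhs => rw [pvBlk]
      rw [if_neg hnil, if_neg hredne]
      have hmul : 2 * 2 ^ d = 2 ^ (d + 1) := by rw [Nat.pow_succ]; ring
      have htk : (pvRed bs).take (2 ^ d) = pvRed (bs.take (2 ^ (d + 1))) := by
        rw [pv_red_take, hmul]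
      have hdp : (pvRed bs).drop (2 ^ d) = pvRed (bs.drop (2 ^ (d + 1))) := by
        rw [pv_red_drop, hmul]
      have hhead : pvXor (bs.take (2 ^ (d + 1))) = pvXor ((pvRed bs).take (2 ^ d)) := by
        rw [htk]
        have hlt : (bs.take (2 ^ (d + 1))).length = 2 ^ (d + 1) := by
          rw [List.length_take]
          omega
        rw [pv_xor_red _ (by rw [hlt]; rw [Nat.pow_succ]; omega)]
        have : (bs.take (2 ^ (d + 1))).length / 2 = 2 ^ d := by rw [hlt, Nat.pow_succ]; omega
        rw [this]
        have h2d : 2 ^ d % 2 = 0 := by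
          obtain ⟨d', rfl⟩ : ∃ d', d = d' + 1 := ⟨d - 1, by omega⟩
          rw [Nat.pow_succ]
          omega
        simp [h2d]
      rw [hhead, hdp]
      congr 1
      exact ih ((bs.drop (2 ^ (d + 1))).length) (by simp; omega) _ rfl
        (by rw [List.length_drop]; exact Nat.dvd_sub hdvd dvd_rfl)

-- with block size 2, blocking IS one reduction level
theorem pv_blk_one : ∀ bs : List Bool, bs.length % 2 = 0 → pvBlk 1 bs = pvRed bs
  | [], _ => by simp [pvBlk, pvRed]
  | [_], h => by simp at h
  | a :: b :: t, h => by
    have ht : t.length % 2 = 0 := by simp at h; omega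
    rw [pvBlk, if_neg (by simp)]
    show (!pvXor ((a :: b :: t).take 2)) :: pvBlk 1 ((a :: b :: t).drop 2) = pvRed (a :: b :: t)
    have h1 : (a :: b :: t).take 2 = [a, b] := rfl
    have h2 : (a :: b :: t).drop 2 = t := rfl
    rw [h1, h2, pv_blk_one t ht]
    have : (!pvXor [a, b]) = (a == b) := by cases a <;> cases b <;> rfl
    rw [this]
    rfl

-- pvV2 really computes the odd part and the 2-adic valuation
theorem pv_v2_spec : ∀ n fuel : Nat, 0 < n → n ≤ fuel →
    n = (pvV2 fuel n).1 * 2 ^ (pvV2 fuel n).2 ∧ (pvV2 fuel n).1 % 2 = 1 := by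
  intro n
  induction n using Nat.strong_induction_on with
  | _ n ih =>
    intro fuel hpos hfuel
    obtain ⟨f, rfl⟩ : ∃ f, fuel = f + 1 := ⟨fuel - 1, by omega⟩
    by_cases hev : n % 2 = 0
    · have h2 : 2 ≤ n := by omega
      have hrec := ih (n / 2) (by omega) f (by omega) (by omega)
      rw [pvV2]
      simp only [hev, beq_self_eq_true, if_true]
      refine ⟨?_, hrec.2⟩
      have h1 := hrec.1
      calc n = 2 * (n / 2) := by omega
        _ = 2 * ((pvV2 f (n / 2)).1 * 2 ^ (pvV2 f (n / 2)).2) := by rw [← h1]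
        _ = (pvV2 f (n / 2)).1 * 2 ^ ((pvV2 f (n / 2)).2 + 1) := by rw [Nat.pow_succ]; ring
    · rw [pvV2]
      have : (n % 2 == 0) = false := by simp; omega
      simp only [this, Bool.false_eq_true, if_false]
      constructor
      · simp
      · omega

-- pvFinal in closed form through pvV2 and pvBlk
theorem pv_final_closed : ∀ n : Nat, ∀ (fuel : Nat) (bs : List Bool),
    bs.length = n → 0 < n → n ≤ fuel →
    pvFinal bs = (if (pvV2 fuel n).2 = 0 then bs else pvBlk (pvV2 fuel n).2 bs) := by
  intro n
  induction n using Nat.strong_induction_on with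
  | _ n ih =>
    intro fuel bs hn hpos hfuel
    obtain ⟨f, rfl⟩ : ∃ f, fuel = f + 1 := ⟨fuel - 1, by omega⟩
    by_cases hev : n % 2 = 0
    · have h2 : 2 ≤ n := by omega
      have hne : bs ≠ [] := by intro hc; rw [hc] at hn; simp at hn; omega
      rw [pvFinal, dif_pos ⟨by rw [hn]; exact hev, hne⟩]
      have hrl : (pvRed bs).length = n / 2 := by rw [pv_red_length, hn]
      rw [ih (n / 2) (by omega) f (pvRed bs) hrl (by omega) (by omega)]
      rw [pvV2]
      simp only [hev, beq_self_eq_true, if_true]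
      have hspec := pv_v2_spec (n / 2) f (by omega) (by omega)
      set p := pvV2 f (n / 2) with hp
      by_cases hp2 : p.2 = 0
      · rw [if_pos hp2]
        simp only [hp2]
        rw [if_neg (by omega)]
        exact (pv_blk_one bs (by rw [hn]; exact hev)).symm
      · rw [if_neg hp2, if_neg (by omega)]
        obtain ⟨d', hd'⟩ : ∃ d', p.2 = d' + 1 := ⟨p.2 - 1, by omega⟩
        rw [hd']
        refine (pv_blk_step (d' + 1) (by omega) bs.length bs rfl ?_).symm
        rw [hn]
        refine ⟨p.1, ?_⟩
        have h1 := hspec.1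
        calc n = 2 * (n / 2) := by omega
          _ = 2 * (p.1 * 2 ^ p.2) := by rw [← h1]
          _ = 2 ^ (d' + 1 + 1) * p.1 := by rw [hd', Nat.pow_succ]; ring
    · rw [pvFinal, dif_neg (by rw [hn]; intro hc; exact hev hc.1)]
      rw [pvV2]
      have : (n % 2 == 0) = false := by simp; omega
      simp only [this, Bool.false_eq_true, if_false]
      simp

-- the per-block parity map is pvBlk
theorem pv_map_blk (d : Nat) : ∀ (n : Nat) (bs : List Bool), bs.length = n * 2 ^ d →
    (List.range n).map (fun k => !pvXor ((bs.drop (k * 2 ^ d)).take (2 ^ d))) = pvBlk d bs := by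
  intro n
  induction n with
  | zero =>
    intro bs h
    simp at h
    rw [h]
    simp [pvBlk]
  | succ n ihn =>
    intro bs h
    have hpow : 0 < 2 ^ d := Nat.pow_pos (by norm_num)
    have hne : bs ≠ [] := by
      intro hc; rw [hc] at h; simp at h
    rw [pvBlk, if_neg hne, List.range_succ_eq_map]
    simp only [List.map_cons, List.map_map, Nat.zero_mul, List.drop_zero]
    congr 1
    rw [← ihn (bs.drop (2 ^ d)) (by
      rw [List.length_drop, h, Nat.succ_mul, Nat.add_sub_cancel])]
    apply List.map_congr_left
    intro k _
    simp only [Function.comp_apply]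
    rw [List.drop_drop, Nat.succ_mul, Nat.add_comm (2 ^ d) (k * 2 ^ d)]

-- B's body after the bit pass, as a function of the bits alone
theorem pv_alt_body (bits : List Bool) (hpos : 0 < bits.length) :
    (let nd := pvV2 (bits.length + 1) bits.length
     if nd.2 == 0 then String.ofList (bits.map (fun b => if b then '1' else '0'))
     else
       let block : Int := 2 ^ nd.2
       let out := (PySem.List.pyRange 0 (nd.1 : Int) 1).foldl
         (fun acc j =>
           let parity := (PySem.List.slice bits (some (j * block)) (some ((j + 1) * block))).foldl
             (fun p b => xor p b) false
           acc ++ [if parity then '0' else '1']) ([] : List Char)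
       String.ofList out)
    = String.ofList ((pvFinal bits).map pvRep) := by
  have hfin := pv_final_closed bits.length (bits.length + 1) bits rfl hpos (by omega)
  have hspec := pv_v2_spec bits.length (bits.length + 1) hpos (by omega)
  set p := pvV2 (bits.length + 1) bits.length with hp
  by_cases hd : p.2 = 0
  · rw [if_pos hd] at hfin
    simp only [hd, beq_self_eq_true, if_true, hfin]
    rfl
  · rw [if_neg hd] at hfin
    have hbe : (p.2 == 0) = false := by simp [hd]
    simp only [hbe, Bool.false_eq_true, if_false, hfin]
    congr 1
    rw [PySem.List.pyRange_one]
    have hto : ((p.1 : Int) - 0).toNat = p.1 := by omega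
    rw [hto, List.foldl_map, PySem.List.foldl_append_singleton_eq_map]
    rw [← pv_map_blk p.2 p.1 bits hspec.1, List.map_map]
    apply List.map_congr_left
    intro k _
    simp only [Function.comp_apply]
    have hc1 : ((0 : Int) + (k : Int)) * (2 ^ p.2 : Int) = ((k * 2 ^ p.2 : Nat) : Int) := by
      push_cast; ring
    have hc2 : ((0 : Int) + (k : Int) + 1) * (2 ^ p.2 : Int) = (((k + 1) * 2 ^ p.2 : Nat) : Int) := by
      push_cast; ring
    rw [hc1, hc2, PySem.List.slice_natCast]
    have hsub : (k + 1) * 2 ^ p.2 - k * 2 ^ p.2 = 2 ^ p.2 := by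
      rw [Nat.succ_mul, Nat.add_sub_cancel_left]
    rw [hsub]
    have hxe : ((bits.drop (k * 2 ^ p.2)).take (2 ^ p.2)).foldl (fun p b => xor p b) false
        = pvXor ((bits.drop (k * 2 ^ p.2)).take (2 ^ p.2)) := rfl
    rw [hxe]
    cases pvXor ((bits.drop (k * 2 ^ p.2)).take (2 ^ p.2)) <;> rfl

-- ===== VERDICT (by name: the statement is the Claim_ definition above) =====
theorem create_checksum_spec : Claim_equal_create_checksum := by
  unfold Claim_equal_create_checksum Spec_create_checksum
  intro str disk _ hpre
  unfold create_checksum create_checksum_alt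
  set l := str.toList with hldef
  set data := if (l.length : Int) > disk then PySem.List.slice l none (some disk) else l with hdata
  -- facts from Pre_: data has even positive length; if the bits are even in number they fit under disk
  have hfacts : data.length % 2 = 0 ∧ 0 < data.length ∧
      ((data.length / 2) % 2 = 0 → ((data.length / 2 : Nat) : Int) ≤ disk ∧ data.length / 2 ≤ l.length) := by
    rcases hpre with ⟨hd, hne, hmin⟩ | ⟨hneg, hev2, hpos2, hodd⟩
    · rw [← hldef] at hmin hne
      have hd0 : 0 ≤ disk := by omega
      have hdlen : data.length = min l.length disk.toNat := by
        rw [hdata]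
        split_ifs with h
        · rw [PySem.List.slice_to _ hd0]
          simp [Nat.min_comm]
        · have hle : l.length ≤ disk.toNat := by omega
          simp [Nat.min_eq_left hle]
      have hlne : l.length ≠ 0 := fun h => hne (List.length_eq_zero_iff.1 h)
      refine ⟨by rw [hdlen]; exact hmin, by rw [hdlen]; omega, fun _ => ⟨?_, ?_⟩⟩
      · rw [hdlen]; omega
      · rw [hdlen]; omega
    · rw [← hldef] at hev2 hpos2 hodd
      have hk : 0 < (-disk).toNat := by omega
      have hl0 : (0:Int) ≤ (l.length : Int) := by positivity
      have hgt : ((l.length : Int) > disk) := by omega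
      have hdlen : data.length = l.length - (-disk).toNat := by
        rw [hdata, if_pos hgt]
        have hde : disk = -(((-disk).toNat : Int)) := by omega
        rw [hde, PySem.List.slice_to_neg_natCast _ _ hk]
        simp
        omega
      exact ⟨by rw [hdlen]; exact hev2, by rw [hdlen]; omega,
        fun hc => absurd hc (by rw [hdlen]; omega)⟩
  obtain ⟨hev, hpos, hcond⟩ := hfacts
  -- both sides compute the first-level bits
  unfold pvAuxA
  show (match pvReduceA data with
        | none => ""
        | some ns => if (ns.length % 2 == 0) = true then pvAuxA l.length ns disk else String.ofList ns)
      = (match pvBits data with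
        | none => ""
        | some bits =>
          let nd := pvV2 (bits.length + 1) bits.length
          if nd.2 == 0 then String.ofList (bits.map (fun b => if b then '1' else '0'))
          else
            let block : Int := 2 ^ nd.2
            let out := (PySem.List.pyRange 0 (nd.1 : Int) 1).foldl
              (fun acc j =>
                let parity := (PySem.List.slice bits (some (j * block)) (some ((j + 1) * block))).foldl
                  (fun p b => xor p b) false
                acc ++ [if parity then '0' else '1']) ([] : List Char)
            String.ofList out)
  rw [pv_reduceA_even data hev, pv_bits_even data hev]
  set bits := pvPairsF (fun a b => a == b) data with hbits
  have hblen : bits.length = data.length / 2 := pv_pairsF_length _ data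
  have hbpos : 0 < bits.length := by rw [hblen]; omega
  show (if ((bits.map pvRep).length % 2 == 0) = true
          then pvAuxA l.length (bits.map pvRep) disk else String.ofList (bits.map pvRep))
      = _
  refine Eq.trans ?_ (pv_alt_body bits hbpos).symm
  have hmlen : (bits.map pvRep).length = bits.length := by simp
  by_cases hb2 : bits.length % 2 = 0
  · have hA : ((bits.map pvRep).length % 2 == 0) = true := by rw [hmlen]; simpa using hb2
    rw [if_pos hA]
    obtain ⟨hdisk, hfuel⟩ := hcond (by rw [← hblen]; exact hb2)
    rw [pv_auxA_rep bits.length bits l.length disk rfl hb2 hbpos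
      (by rw [hblen]; exact_mod_cast hdisk) (by rw [hblen]; exact hfuel)]
    congr 2
    conv_rhs => rw [pvFinal]
    rw [dif_pos ⟨hb2, by intro hc; rw [hc] at hbpos; simp at hbpos⟩]
  · have hA : ((bits.map pvRep).length % 2 == 0) = false := by rw [hmlen]; simp; omega
    rw [if_neg (by simp; omega)]
    congr 1
    conv_rhs => rw [pvFinal]
    rw [dif_neg (by intro hc; exact hb2 hc.1)]
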